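-- pv_equiv track=rewrite | github.com/akrherz/iem | cgi-bin/request/coop.py | get_tablename
-- ===== SOURCE A (Python) =====
-- def get_tablename(stations):
--     """Figure out the table that has the data for these stations"""
--     states = []
--     for sid in stations:
--         if sid[:2] not in states:
--             states.append(sid[:2])
--     if len(states) == 1:
--         return "alldata_%s" % (states[0],)
--     return "alldata"
-- ===== SOURCE B (Python) =====
-- def get_tablename(stations):
--     """Figure out the table that has the data for these stations"""
--     if not stations:
--         return "alldata"
--     first = stations[0][:2]
--     if all(sid[:2] == first for sid in stations):
--         return "alldata_%s" % (first,)
--     return "alldata"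
-- ===== Notes on version B (the rewrite author's own statement) =====
-- stated objective: simpler
-- what changed: Replaces the dedup-list-then-count strategy with an empty guard plus a single all-prefixes-equal-the-first pass that maintains no collection.
import Mathlib
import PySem

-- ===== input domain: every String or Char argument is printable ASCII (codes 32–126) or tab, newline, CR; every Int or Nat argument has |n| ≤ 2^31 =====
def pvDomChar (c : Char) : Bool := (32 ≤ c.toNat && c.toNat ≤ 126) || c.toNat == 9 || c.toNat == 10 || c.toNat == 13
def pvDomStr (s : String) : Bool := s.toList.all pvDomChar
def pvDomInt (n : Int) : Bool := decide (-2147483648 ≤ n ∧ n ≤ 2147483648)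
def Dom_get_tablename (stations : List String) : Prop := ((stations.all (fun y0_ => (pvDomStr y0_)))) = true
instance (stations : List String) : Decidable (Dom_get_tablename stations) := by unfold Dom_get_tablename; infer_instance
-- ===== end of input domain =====

-- B replaces A's dedup-list-then-count strategy with an empty guard and a single
-- all-prefixes-equal-the-first pass (objective: simpler).


-- sid[:2] — exact: a nonnegative upper slice bound clamps, i.e. take 2
def pvPrefix2 (s : String) : String := String.ofList (s.toList.take 2)

-- ===== PORT A =====
def get_tablename (stations : List String) : String :=
  let states := stations.foldl
    (fun states sid => if pvPrefix2 sid ∈ states then states else states ++ [pvPrefix2 sid]) []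
  if states.length = 1 then "alldata_" ++ states[0]! else "alldata"

-- ===== PORT B =====
def get_tablename_alt (stations : List String) : String :=
  match stations with
  | [] => "alldata"
  | s0 :: _ =>
    let first := pvPrefix2 s0
    if stations.all (fun sid => pvPrefix2 sid == first) then "alldata_" ++ first
    else "alldata"

-- ===== PRECONDITION & SPEC =====
def Spec_get_tablename (stations : List String) (out : String) : Prop := out = get_tablename_alt stations
instance (stations : List String) (out : String) : Decidable (Spec_get_tablename stations out) := by unfold Spec_get_tablename; infer_instance

-- ===== CLAIM (what is proved, stated in full; the proofs are below) =====
def Claim_equal_get_tablename : Prop := ∀ (stations : List String), Dom_get_tablename stations → Spec_get_tablename stations (get_tablename stations)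

-- ===== LEMMAS AND PROOFS =====

def pvStep (states : List String) (sid : String) : List String :=
  if pvPrefix2 sid ∈ states then states else states ++ [pvPrefix2 sid]

theorem mem_foldl_of_mem (l : List String) (acc : List String) (a : String)
    (h : a ∈ acc) : a ∈ l.foldl pvStep acc := by
  induction l generalizing acc with
  | nil => exact h
  | cons x xs ih =>
    apply ih
    unfold pvStep
    split <;> simp [h]

theorem mem_foldl_self (l : List String) (acc : List String) (s : String)
    (h : s ∈ l) : pvPrefix2 s ∈ l.foldl pvStep acc := by
  induction l generalizing acc with
  | nil => cases h
  | cons x xs ih =>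
    simp only [List.foldl_cons]
    rcases List.mem_cons.mp h with h | h
    · subst h
      exact mem_foldl_of_mem xs _ _ (by unfold pvStep; split <;> simp_all)
    · exact ih _ h

theorem foldl_all_eq (l : List String) (p : String)
    (h : ∀ s ∈ l, pvPrefix2 s = p) : l.foldl pvStep [p] = [p] := by
  induction l with
  | nil => rfl
  | cons x xs ih =>
    have hx : pvPrefix2 x = p := h x (by simp)
    simp only [List.foldl_cons, pvStep, hx, List.mem_singleton]
    exact ih (fun s hs => h s (by simp [hs]))

theorem two_mem_length (l : List String) (a b : String) (ha : a ∈ l) (hb : b ∈ l)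
    (hne : a ≠ b) : l.length ≠ 1 := by
  intro hlen
  match l, hlen with
  | [x], _ => simp_all

theorem get_tablename_spec' (stations : List String) :
    get_tablename stations = get_tablename_alt stations := by
  cases stations with
  | nil => rfl
  | cons s0 rest =>
    simp only [get_tablename, get_tablename_alt,
      show (fun states sid => if pvPrefix2 sid ∈ states then states else states ++ [pvPrefix2 sid])
        = pvStep from rfl]
    by_cases hall : ∀ s ∈ s0 :: rest, pvPrefix2 s = pvPrefix2 s0
    · have h1 : (s0 :: rest).foldl pvStep [] = [pvPrefix2 s0] := by
        rw [List.foldl_cons, show pvStep [] s0 = [pvPrefix2 s0] by simp [pvStep]]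
        exact foldl_all_eq rest _ (fun s hs => hall s (by simp [hs]))
      have hb : (s0 :: rest).all (fun sid => pvPrefix2 sid == pvPrefix2 s0) = true := by
        rw [List.all_eq_true]; simpa using hall
      simp [h1, hb]
    · rw [not_forall] at hall
      simp only [not_forall, exists_prop] at hall
      obtain ⟨s, hs, hne⟩ := hall
      have hlen : ((s0 :: rest).foldl pvStep []).length ≠ 1 :=
        two_mem_length _ _ _ (mem_foldl_self _ _ _ (by simp)) (mem_foldl_self _ _ _ hs)
          (fun h => hne h.symm)
      have hb : (s0 :: rest).all (fun sid => pvPrefix2 sid == pvPrefix2 s0) = false := by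
        rw [List.all_eq_false]
        exact ⟨s, hs, by simp [hne]⟩
      simp only [List.foldl_cons] at hlen
      simp [hb, if_neg hlen]

-- ===== VERDICT (by name: the statement is the Claim_ definition above) =====
theorem get_tablename_spec : Claim_equal_get_tablename := by
  intro stations _
  exact get_tablename_spec' stations
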